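-- pv_equiv track=rewrite | github.com/SymboLiclight-Ting/SL | src/symboliclight/formatter.py | join_groups
-- ===== SOURCE A (Python) =====
-- def join_groups(groups: list[list[str]]) -> list[str]:
--     lines: list[str] = []
--     for group in groups:
--         if not group:
--             continue
--         if lines:
--             lines.append("")
--         lines.extend(group)
--     return lines
-- ===== SOURCE B (Python) =====
-- def join_groups(groups: list[list[str]]) -> list[str]:
--     if not groups:
--         return []
--     rest = join_groups(groups[1:])
--     head = groups[0]
--     if not head:
--         return rest
--     if not rest:
--         return list(head)
--     return head + [""] + rest
-- ===== Notes on version B (the rewrite author's own statement) =====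
-- stated objective: alternative
-- what changed: B is a structural recursion on the list of groups: it joins the tail first and decides the blank separator from whether the recursive result is empty (lookahead to the right), instead of A's single forward loop that keeps an accumulator and tests its emptiness (state from the left).
import Mathlib
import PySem

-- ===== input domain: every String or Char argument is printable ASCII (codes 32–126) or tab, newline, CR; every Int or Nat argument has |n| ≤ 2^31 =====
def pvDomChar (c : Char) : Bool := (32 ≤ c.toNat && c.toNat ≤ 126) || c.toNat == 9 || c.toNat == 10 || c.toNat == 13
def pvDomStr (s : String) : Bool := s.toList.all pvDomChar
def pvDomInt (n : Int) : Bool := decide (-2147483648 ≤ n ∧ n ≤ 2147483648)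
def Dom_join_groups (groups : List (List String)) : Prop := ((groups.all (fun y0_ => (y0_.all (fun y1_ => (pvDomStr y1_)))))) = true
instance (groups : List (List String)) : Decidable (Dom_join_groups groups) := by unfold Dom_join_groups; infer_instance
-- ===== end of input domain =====

-- B replaces A's forward loop (separator decided by the accumulated output so far) with a
-- structural recursion that joins the tail first and decides the separator by looking at
-- the recursive result; same cost, genuinely different control structure.

-- ===== PORT A =====
-- literal port of A's loop: skip empty groups; append "" when output is nonempty; extend.
def join_groups (groups : List (List String)) : List String :=
  groups.foldl
    (fun lines group =>
      if group = [] then lines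
      else (if lines ≠ [] then lines ++ [""] else lines) ++ group)
    []

-- ===== PORT B =====
-- literal port of Source B's recursion: join the tail, then prepend the head with a
-- separator iff both head and the recursive result are nonempty.
def join_groups_alt : List (List String) → List String
  | [] => []
  | head :: gs =>
    let rest := join_groups_alt gs
    if head = [] then rest
    else if rest = [] then head
    else head ++ [""] ++ rest

-- ===== PRECONDITION & SPEC =====
def Spec_join_groups (groups : List (List String)) (out : List String) : Prop := out = join_groups_alt groups
instance (groups : List (List String)) (out : List String) : Decidable (Spec_join_groups groups out) := by unfold Spec_join_groups; infer_instance

-- ===== CLAIM (what is proved, stated in full; the proofs are below) =====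
def Claim_equal_join_groups : Prop := ∀ (groups : List (List String)), Dom_join_groups groups → Spec_join_groups groups (join_groups groups)

-- ===== LEMMAS AND PROOFS =====

-- B's result is empty exactly when every group is empty.
theorem jg_alt_nil_iff (gs : List (List String)) :
    join_groups_alt gs = [] ↔ gs.filter (fun g => decide (g ≠ [])) = [] := by
  induction gs with
  | nil => simp [join_groups_alt]
  | cons g gs ih =>
    by_cases hg : g = []
    · simp [join_groups_alt, hg, ih]
    · constructor
      · intro h
        exfalso
        by_cases hr : join_groups_alt gs = [] <;>
          simp [join_groups_alt, hg, hr] at h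
      · intro h
        exfalso
        have : g ∈ List.filter (fun g => decide (g ≠ [])) (g :: gs) := by
          simp [List.mem_filter, hg]
        rw [h] at this
        exact absurd this (List.not_mem_nil)

-- blank-prefixed flatten of the nonempty groups, in terms of B's recursion.
theorem jg_flat_eq (gs : List (List String)) :
    (gs.filter (fun g => decide (g ≠ []))).flatMap (fun g => "" :: g)
      = (if join_groups_alt gs = [] then [] else "" :: join_groups_alt gs) := by
  induction gs with
  | nil => simp [join_groups_alt]
  | cons g gs ih =>
    by_cases hg : g = []
    · simpa [join_groups_alt, hg] using ih
    · by_cases hr : join_groups_alt gs = []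
      · have hf : gs.filter (fun g => decide (g ≠ [])) = [] := (jg_alt_nil_iff gs).1 hr
        rw [List.filter_cons_of_pos (by simp [hg]), hf]
        simp [join_groups_alt, hg, hr]
      · rw [List.filter_cons_of_pos (by simp [hg]), List.flatMap_cons, ih]
        simp [join_groups_alt, hg, hr]

-- A's loop with a nonempty accumulator appends every further nonempty group with a blank.
theorem jg_fold_ne (gs : List (List String)) (acc : List String) (h : acc ≠ []) :
    gs.foldl
      (fun lines group =>
        if group = [] then lines
        else (if lines ≠ [] then lines ++ [""] else lines) ++ group)
      acc
    = acc ++ (gs.filter (fun g => decide (g ≠ []))).flatMap (fun g => "" :: g) := by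
  induction gs generalizing acc with
  | nil => simp
  | cons g gs ih =>
    rw [List.foldl_cons]
    by_cases hg : g = []
    · rw [if_pos hg, ih acc h]; simp [hg]
    · rw [if_neg hg, if_pos h, ih (acc ++ [""] ++ g) (by simp [h])]
      simp [hg]

theorem jg_main (gs : List (List String)) : join_groups gs = join_groups_alt gs := by
  induction gs with
  | nil => simp [join_groups, join_groups_alt]
  | cons g gs ih =>
    by_cases hg : g = []
    · simpa [join_groups, join_groups_alt, hg] using ih
    · have h1 : join_groups (g :: gs)
          = g ++ (gs.filter (fun g => decide (g ≠ []))).flatMap (fun g => "" :: g) := by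
        simp only [join_groups, List.foldl_cons]
        rw [show (if g = [] then ([] : List String)
              else (if ([] : List String) ≠ [] then [] ++ [""] else []) ++ g) = g from by
            simp [hg]]
        exact jg_fold_ne gs g hg
      rw [h1, jg_flat_eq]
      by_cases hr : join_groups_alt gs = [] <;> simp [join_groups_alt, hg, hr]

-- ===== VERDICT (by name: the statement is the Claim_ definition above) =====
theorem join_groups_spec : Claim_equal_join_groups := by
  intro groups _
  exact jg_main groups
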